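-- pv_equiv track=rewrite | github.com/decatt/HRL-microRTS | main.py | embedding
-- ===== SOURCE A (Python) =====
-- def embedding(states, size):
--     zs = []
--     for state in states:
--         z = [0, 0, 0, 0, 0, 0, 0, 0, 0, 0, 0, 0, ]
--         for i in range(size):
--             for j in range(size):
--                 if state[i][j][11] == 1:
--                     if state[i][j][15] == 1:
--                         z[0] = z[0] + 1
--                     if state[i][j][16] == 1:
--                         z[1] = z[1] + 1
--                     if state[i][j][17] == 1:
--                         z[2] = z[2] + 1
--                     if state[i][j][18] == 1:
--                         z[3] = z[3] + 1
--                     if state[i][j][19] == 1: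
--                         z[4] = z[4] + 1
--                     if state[i][j][20] == 1:
--                         z[5] = z[5] + 1
--                 if state[i][j][12] == 1:
--                     if state[i][j][15] == 1:
--                         z[6] = z[6] + 1
--                     if state[i][j][16] == 1:
--                         z[7] = z[7] + 1
--                     if state[i][j][17] == 1:
--                         z[8] = z[8] + 1
--                     if state[i][j][18] == 1:
--                         z[9] = z[9] + 1
--                     if state[i][j][19] == 1:
--                         z[10] = z[10] + 1
--                     if state[i][j][20] == 1:
--                         z[11] = z[11] + 1
--         zs.append(z)
--     return zs
-- ===== SOURCE B (Python) =====
-- PAIRS = [(11, 15), (11, 16), (11, 17), (11, 18), (11, 19), (11, 20),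
--          (12, 15), (12, 16), (12, 17), (12, 18), (12, 19), (12, 20)]
--
--
-- def embedding(states, size):
--     out = []
--     for state in states:
--         cells = [state[i][j] for i in range(size) for j in range(size)]
--         out.append([sum(1 for c in cells if c[u] == 1 and c[v] == 1)
--                     for u, v in PAIRS])
--     return out
-- ===== Notes on version B (the rewrite author's own statement) =====
-- stated objective: simpler
-- what changed: A threads one mutable 12-counter vector through a single interleaved grid traversal with twelve guarded in-place updates; B flattens each grid once into a cell list and builds the result as twelve independent self-contained counts, one sum per (unit-flag, feature) index pair.
import Mathlib
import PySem

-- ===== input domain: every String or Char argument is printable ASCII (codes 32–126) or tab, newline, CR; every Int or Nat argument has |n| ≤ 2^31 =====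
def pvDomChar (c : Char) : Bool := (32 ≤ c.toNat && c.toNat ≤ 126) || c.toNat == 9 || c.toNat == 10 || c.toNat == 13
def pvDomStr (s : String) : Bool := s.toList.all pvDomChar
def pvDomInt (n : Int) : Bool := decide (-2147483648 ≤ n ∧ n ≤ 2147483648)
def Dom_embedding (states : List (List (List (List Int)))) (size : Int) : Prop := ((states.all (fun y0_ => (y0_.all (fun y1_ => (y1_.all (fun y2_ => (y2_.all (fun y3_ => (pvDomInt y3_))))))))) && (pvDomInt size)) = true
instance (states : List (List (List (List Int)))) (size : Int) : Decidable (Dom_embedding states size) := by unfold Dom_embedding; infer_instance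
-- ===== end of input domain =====

-- B replaces A's single interleaved mutable-counter traversal by a flattened cell list and
-- twelve independent per-pair counts (objective: simpler decomposition, same cost).


-- ===== PORT A =====
-- cell feature read `state[i][j][k]`: in-range under Pre_; pyGetD's default is never
-- consulted on admitted inputs
def pvG (c : List Int) (k : Int) : Int := PySem.List.pyGetD c k 0

-- `z[k] = z[k] + 1` for the constant in-range indices 0..11 of the 12-list z
def pvInc (z : List Int) (k : Nat) : List Int := z.set k (z.getD k 0 + 1)

-- the body of A's innermost loop: the twelve guarded in-place updates, in A's order
def pvStep (z : List Int) (c : List Int) : List Int :=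
  let z :=
    if pvG c 11 = 1 then
      let z := if pvG c 15 = 1 then pvInc z 0 else z
      let z := if pvG c 16 = 1 then pvInc z 1 else z
      let z := if pvG c 17 = 1 then pvInc z 2 else z
      let z := if pvG c 18 = 1 then pvInc z 3 else z
      let z := if pvG c 19 = 1 then pvInc z 4 else z
      if pvG c 20 = 1 then pvInc z 5 else z
    else z
  if pvG c 12 = 1 then
    let z := if pvG c 15 = 1 then pvInc z 6 else z
    let z := if pvG c 16 = 1 then pvInc z 7 else z
    let z := if pvG c 17 = 1 then pvInc z 8 else z
    let z := if pvG c 18 = 1 then pvInc z 9 else z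
    let z := if pvG c 19 = 1 then pvInc z 10 else z
    if pvG c 20 = 1 then pvInc z 11 else z
  else z

def embedding (states : List (List (List (List Int)))) (size : Int) : List (List Int) :=
  states.foldl
    (fun zs state =>
      zs ++ [(PySem.List.pyRange 0 size 1).foldl
              (fun z i =>
                (PySem.List.pyRange 0 size 1).foldl
                  (fun z j => pvStep z (PySem.List.pyGetD (PySem.List.pyGetD state i []) j [])) z)
              [0, 0, 0, 0, 0, 0, 0, 0, 0, 0, 0, 0]])
    []

-- ===== PORT B =====
-- the module-level PAIRS constant of Source B
def pvPairs : List (Int × Int) :=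
  [(11, 15), (11, 16), (11, 17), (11, 18), (11, 19), (11, 20),
   (12, 15), (12, 16), (12, 17), (12, 18), (12, 19), (12, 20)]

-- `sum(1 for c in cells if c[u] == 1 and c[v] == 1)`
def pvCnt (cells : List (List Int)) (u v : Int) : Int :=
  cells.foldl (fun acc c => acc + if pvG c u = 1 ∧ pvG c v = 1 then 1 else 0) 0

def embedding_alt (states : List (List (List (List Int)))) (size : Int) : List (List Int) :=
  states.map (fun state =>
    let cells := (PySem.List.pyRange 0 size 1).flatMap (fun i =>
      (PySem.List.pyRange 0 size 1).map (fun j =>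
        PySem.List.pyGetD (PySem.List.pyGetD state i []) j []))
    pvPairs.map (fun p => pvCnt cells p.1 p.2))

-- ===== PRECONDITION & SPEC =====
-- Pre_ is exactly where Python A returns: every cell A touches (the size×size top-left block)
-- must have the indices A reads — 11 and 12 always, and 15..20 as soon as flag 11 or 12 is 1.
def Pre_embedding (states : List (List (List (List Int)))) (size : Int) : Prop :=
  ∀ state ∈ states, size.toNat ≤ state.length ∧
    ∀ row ∈ state.take size.toNat, size.toNat ≤ row.length ∧
      ∀ c ∈ row.take size.toNat, 13 ≤ c.length ∧
        ((c.getD 11 0 = 1 ∨ c.getD 12 0 = 1) → 21 ≤ c.length)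
instance (states : List (List (List (List Int)))) (size : Int) : Decidable (Pre_embedding states size) := by unfold Pre_embedding; infer_instance

def pvWitness_embedding : List (List (List (List Int))) × Int :=
  ([[[[0, 0, 0, 0, 0, 0, 0, 0, 0, 0, 0, 1, 0, 0, 0, 1, 0, 0, 0, 0, 1]]]], 1)

def Spec_embedding (states : List (List (List (List Int)))) (size : Int) (out : List (List Int)) : Prop := out = embedding_alt states size
instance (states : List (List (List (List Int)))) (size : Int) (out : List (List Int)) : Decidable (Spec_embedding states size out) := by unfold Spec_embedding; infer_instance

-- ===== CLAIM (what is proved, stated in full; the proofs are below) =====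
def Claim_equal_embedding : Prop := ∀ (states : List (List (List (List Int)))) (size : Int), Dom_embedding states size → Pre_embedding states size → Spec_embedding states size (embedding states size)

-- ===== LEMMAS AND PROOFS =====

-- 0/1 contribution of one cell to the (u,v) counter
def pvB (c : List Int) (u v : Int) : Int := if pvG c u = 1 ∧ pvG c v = 1 then 1 else 0

lemma pvGroupA (a0 a1 a2 a3 a4 a5 a6 a7 a8 a9 a10 a11 : Int) (c : List Int) :
    (let z := [a0, a1, a2, a3, a4, a5, a6, a7, a8, a9, a10, a11]
     let z := if pvG c 15 = 1 then pvInc z 0 else z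
     let z := if pvG c 16 = 1 then pvInc z 1 else z
     let z := if pvG c 17 = 1 then pvInc z 2 else z
     let z := if pvG c 18 = 1 then pvInc z 3 else z
     let z := if pvG c 19 = 1 then pvInc z 4 else z
     if pvG c 20 = 1 then pvInc z 5 else z) =
      [a0 + (if pvG c 15 = 1 then 1 else 0), a1 + (if pvG c 16 = 1 then 1 else 0),
       a2 + (if pvG c 17 = 1 then 1 else 0), a3 + (if pvG c 18 = 1 then 1 else 0),
       a4 + (if pvG c 19 = 1 then 1 else 0), a5 + (if pvG c 20 = 1 then 1 else 0),
       a6, a7, a8, a9, a10, a11] := by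
  split_ifs <;> simp [pvInc]

lemma pvGroupB (a0 a1 a2 a3 a4 a5 a6 a7 a8 a9 a10 a11 : Int) (c : List Int) :
    (let z := [a0, a1, a2, a3, a4, a5, a6, a7, a8, a9, a10, a11]
     let z := if pvG c 15 = 1 then pvInc z 6 else z
     let z := if pvG c 16 = 1 then pvInc z 7 else z
     let z := if pvG c 17 = 1 then pvInc z 8 else z
     let z := if pvG c 18 = 1 then pvInc z 9 else z
     let z := if pvG c 19 = 1 then pvInc z 10 else z
     if pvG c 20 = 1 then pvInc z 11 else z) =
      [a0, a1, a2, a3, a4, a5,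
       a6 + (if pvG c 15 = 1 then 1 else 0), a7 + (if pvG c 16 = 1 then 1 else 0),
       a8 + (if pvG c 17 = 1 then 1 else 0), a9 + (if pvG c 18 = 1 then 1 else 0),
       a10 + (if pvG c 19 = 1 then 1 else 0), a11 + (if pvG c 20 = 1 then 1 else 0)] := by
  split_ifs <;> simp [pvInc]

lemma pvStep_eval (a0 a1 a2 a3 a4 a5 a6 a7 a8 a9 a10 a11 : Int) (c : List Int) :
    pvStep [a0, a1, a2, a3, a4, a5, a6, a7, a8, a9, a10, a11] c =
      [a0 + pvB c 11 15, a1 + pvB c 11 16, a2 + pvB c 11 17, a3 + pvB c 11 18,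
       a4 + pvB c 11 19, a5 + pvB c 11 20, a6 + pvB c 12 15, a7 + pvB c 12 16,
       a8 + pvB c 12 17, a9 + pvB c 12 18, a10 + pvB c 12 19, a11 + pvB c 12 20] := by
  show (let z := if pvG c 11 = 1 then
          (let z := [a0, a1, a2, a3, a4, a5, a6, a7, a8, a9, a10, a11]
           let z := if pvG c 15 = 1 then pvInc z 0 else z
           let z := if pvG c 16 = 1 then pvInc z 1 else z
           let z := if pvG c 17 = 1 then pvInc z 2 else z
           let z := if pvG c 18 = 1 then pvInc z 3 else z
           let z := if pvG c 19 = 1 then pvInc z 4 else z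
           if pvG c 20 = 1 then pvInc z 5 else z)
        else [a0, a1, a2, a3, a4, a5, a6, a7, a8, a9, a10, a11]
        if pvG c 12 = 1 then
          (let z0 := z
           let z := if pvG c 15 = 1 then pvInc z0 6 else z0
           let z := if pvG c 16 = 1 then pvInc z 7 else z
           let z := if pvG c 17 = 1 then pvInc z 8 else z
           let z := if pvG c 18 = 1 then pvInc z 9 else z
           let z := if pvG c 19 = 1 then pvInc z 10 else z
           if pvG c 20 = 1 then pvInc z 11 else z)
        else z) = _
  by_cases h11 : pvG c 11 = 1 <;> by_cases h12 : pvG c 12 = 1 <;>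
    simp only [h11, h12, if_pos, if_false, pvGroupA, pvGroupB] <;>
    simp [pvB, h11, h12]

-- per-cell contributions summed over the cell list
def pvS (cells : List (List Int)) (u v : Int) : Int := (cells.map (fun c => pvB c u v)).sum

lemma pvCnt_eq (cells : List (List Int)) (u v : Int) : pvCnt cells u v = pvS cells u v := by
  simpa [pvCnt, pvS, pvB] using
    PySem.List.foldl_add (l := cells) (g := fun c => pvB c u v) (a := 0)

lemma fold_pvStep (cells : List (List Int)) (a0 a1 a2 a3 a4 a5 a6 a7 a8 a9 a10 a11 : Int) :
    cells.foldl pvStep [a0, a1, a2, a3, a4, a5, a6, a7, a8, a9, a10, a11] =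
      [a0 + pvS cells 11 15, a1 + pvS cells 11 16, a2 + pvS cells 11 17, a3 + pvS cells 11 18,
       a4 + pvS cells 11 19, a5 + pvS cells 11 20, a6 + pvS cells 12 15, a7 + pvS cells 12 16,
       a8 + pvS cells 12 17, a9 + pvS cells 12 18, a10 + pvS cells 12 19, a11 + pvS cells 12 20] := by
  induction cells generalizing a0 a1 a2 a3 a4 a5 a6 a7 a8 a9 a10 a11 with
  | nil => simp [pvS]
  | cons c cs ih =>
      simp only [List.foldl_cons, pvStep_eval, ih]
      simp [pvS, add_assoc]

lemma foldl_flatMap_pv {alpha beta gamma : Type} (g : beta → List alpha) (f : gamma → alpha → gamma)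
    (l : List beta) (init : gamma) :
    (l.flatMap g).foldl f init = l.foldl (fun acc b => (g b).foldl f acc) init := by
  induction l generalizing init with
  | nil => rfl
  | cons b bs ih => simp [List.foldl_append, ih]

lemma state_eval (size : Int) (state : List (List (List Int))) :
    (PySem.List.pyRange 0 size 1).foldl
        (fun z i =>
          (PySem.List.pyRange 0 size 1).foldl
            (fun z j => pvStep z (PySem.List.pyGetD (PySem.List.pyGetD state i []) j [])) z)
        [0, 0, 0, 0, 0, 0, 0, 0, 0, 0, 0, 0] =
      (let cells := (PySem.List.pyRange 0 size 1).flatMap (fun i =>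
         (PySem.List.pyRange 0 size 1).map (fun j =>
           PySem.List.pyGetD (PySem.List.pyGetD state i []) j []))
       pvPairs.map (fun p => pvCnt cells p.1 p.2)) := by
  have h :
      ((PySem.List.pyRange 0 size 1).flatMap (fun i =>
          (PySem.List.pyRange 0 size 1).map (fun j =>
            PySem.List.pyGetD (PySem.List.pyGetD state i []) j []))).foldl pvStep
        [0, 0, 0, 0, 0, 0, 0, 0, 0, 0, 0, 0] =
      (PySem.List.pyRange 0 size 1).foldl
        (fun z i =>
          (PySem.List.pyRange 0 size 1).foldl
            (fun z j => pvStep z (PySem.List.pyGetD (PySem.List.pyGetD state i []) j [])) z)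
        [0, 0, 0, 0, 0, 0, 0, 0, 0, 0, 0, 0] := by
    rw [foldl_flatMap_pv]; simp only [List.foldl_map]
  rw [← h, fold_pvStep]
  simp [pvPairs, pvCnt_eq]

theorem embedding_spec : Claim_equal_embedding := by
  intro states size _ _
  show embedding states size = embedding_alt states size
  unfold embedding embedding_alt
  rw [PySem.List.foldl_append_singleton_eq_map]
  exact List.map_congr_left fun state _ => state_eval size state
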